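-- pv_equiv track=rewrite | github.com/ankitshah009/leetcode_python | graphs/1849-splitting_a_string_into_descending_consecutive_values.py | splitString
-- ===== SOURCE A (Python) =====
-- def splitString(s: str) -> bool:
--     """
--     DFS with early termination.
--     """
--     def dfs(start: int, prev: int) -> bool:
--         if start == len(s):
--             return True
--
--         for end in range(start + 1, len(s) + 1):
--             num = int(s[start:end])
--
--             # Prune: if num < prev - 1, no point continuing
--             if num < prev - 1:
--                 break
--
--             if num == prev - 1:
--                 if dfs(end, num):
--                     return True
--
--         return False
--
--     # Try each first number length (excluding full string)
--     for first_len in range(1, len(s)):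
--         first = int(s[:first_len])
--         if dfs(first_len, first):
--             return True
--
--     return False
-- ===== SOURCE B (Python) =====
-- def splitString(s: str) -> bool:
--     n = len(s)
--     work = [(fl, int(s[:fl])) for fl in range(1, n)]
--     while work:
--         start, prev = work.pop(0)
--         if start == n:
--             return True
--         succs = []
--         for end in range(start + 1, n + 1):
--             num = int(s[start:end])
--             if num < prev - 1:
--                 break
--             if num == prev - 1:
--                 succs.append((end, num))
--         work = succs + work
--     return False
-- ===== Notes on version B (the rewrite author's own statement) =====
-- stated objective: alternative
-- what changed: A's recursive dfs with an inner for/break is replaced by an explicit iterative worklist of (start, prev) states: each popped state's matching continuations (including every zero-run match) are generated as a successor list and pushed back, so the search is a loop over a stack instead of recursion.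
import Mathlib
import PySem

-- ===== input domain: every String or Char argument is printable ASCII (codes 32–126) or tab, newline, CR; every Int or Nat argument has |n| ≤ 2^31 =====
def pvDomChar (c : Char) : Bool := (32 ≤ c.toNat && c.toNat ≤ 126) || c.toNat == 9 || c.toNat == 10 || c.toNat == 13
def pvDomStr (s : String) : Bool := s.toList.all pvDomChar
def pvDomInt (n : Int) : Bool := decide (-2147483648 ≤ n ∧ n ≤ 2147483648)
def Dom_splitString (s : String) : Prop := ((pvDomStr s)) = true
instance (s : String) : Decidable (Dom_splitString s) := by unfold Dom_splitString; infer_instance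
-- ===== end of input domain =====

-- B replaces A's recursive dfs by an explicit iterative worklist of (start, prev) states (alternative decomposition, same results).

-- arithmetic facts cited by the termination proofs of succsB / outerA / seedsB below
theorem pvTermD (L s j : Nat) (h : s + 1 + j ≤ L) : L - (j + 1) < L - j := by
  refine Nat.sub_lt_sub_left ?_ (Nat.lt_succ_self j)
  exact Nat.lt_of_lt_of_le (Nat.lt_add_of_pos_left (Nat.succ_pos s)) h
theorem pvTermE (L f : Nat) (h : f < L) : L - (f + 1) < L - f :=
  Nat.sub_lt_sub_left h (Nat.lt_succ_self f)

-- ===== PORT A =====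
-- int(chunk); `.getD 0` is unreachable under Pre_ (on a non-digit chunk Python A raises ValueError)
def parseA (cs : List Char) : Int := (PySem.Int.ofChars? cs).getD 0

-- dfs(start, prev) and its inner `for end in range(start+1, len(s)+1)` loop (end = start+1+j);
-- `fuel` is only a structural totality guard: splitString passes pvFuelA, which exceeds the call depth
-- (proved in the lemmas below), so the 0-fuel branch is never taken.  Indices are nonnegative
-- throughout, so Nat indices and drop/take give exactly Python's s[start:end]; `false` at the `<`
-- branch is the `break`; `num = int(s[start:end])` (bound once in Python) is inlined at its uses.
mutual
def dfsA (l : List Char) (fuel : Nat) (start : Nat) (prev : Int) : Bool :=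
  match fuel with
  | 0 => false
  | f + 1 =>
    if start = l.length then true
    else loopA l f start prev 0
def loopA (l : List Char) (fuel : Nat) (start : Nat) (prev : Int) (j : Nat) : Bool :=
  match fuel with
  | 0 => false
  | f + 1 =>
    if start + 1 + j ≤ l.length then
      if parseA ((l.drop start).take (1 + j)) < prev - 1 then false
      else if parseA ((l.drop start).take (1 + j)) = prev - 1 then
        dfsA l f (start + 1 + j) (parseA ((l.drop start).take (1 + j))) || loopA l f start prev (j + 1)
      else loopA l f start prev (j + 1)
    else false
end

-- enough fuel for every call chain of dfs on a string of length n
def pvFuelA (n : Nat) : Nat := (n + 2) * (n + 3)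

-- `for first_len in range(1, len(s))`
def outerA (l : List Char) (fl : Nat) : Bool :=
  if fl < l.length then dfsA l (pvFuelA l.length) fl (parseA (l.take fl)) || outerA l (fl + 1)
  else false
termination_by l.length - fl
decreasing_by exact pvTermE l.length fl ‹fl < l.length›

def splitString (s : String) : Bool := outerA s.toList 1

-- ===== PORT B =====
-- the successor scan of Source B: ends start+1+j, break on num < prev-1, collect (end, num) when
-- num == prev-1; int() is PySem.Int.ofChars? (`.getD 0` unreachable under Pre_, where B raises too)
def succsB (l : List Char) (start : Nat) (prev : Int) (j : Nat) : List (Nat × Int) :=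
  if start + 1 + j ≤ l.length then
    if (PySem.Int.ofChars? ((l.drop start).take (1 + j))).getD 0 < prev - 1 then []
    else if (PySem.Int.ofChars? ((l.drop start).take (1 + j))).getD 0 = prev - 1 then
      (start + 1 + j, (PySem.Int.ofChars? ((l.drop start).take (1 + j))).getD 0) :: succsB l start prev (j + 1)
    else succsB l start prev (j + 1)
  else []
termination_by l.length - j
decreasing_by all_goals exact pvTermD l.length start j ‹start + 1 + j ≤ l.length›

-- weight of a worklist (states closer to the end of the string weigh less): an upper bound on the
-- number of loop iterations, used only as the totality guard of loopB
def wlW (L : Nat) (stack : List (Nat × Int)) : Nat := (stack.map (fun p => 2 ^ (L - p.1))).sum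

-- `while work: start, prev = work.pop(0); …; work = succs + work`; `fuel` is only a structural
-- totality guard: splitString_alt passes wlW + 1, which the lemmas below prove sufficient
def loopB (l : List Char) (fuel : Nat) (stack : List (Nat × Int)) : Bool :=
  match fuel, stack with
  | _, [] => false
  | 0, _ => false
  | f + 1, (st, pv) :: rest =>
    if st = l.length then true
    else loopB l f (succsB l st pv 0 ++ rest)

-- the seed comprehension `[(fl, int(s[:fl])) for fl in range(1, n)]`
def seedsB (l : List Char) (fl : Nat) : List (Nat × Int) :=
  if fl < l.length then (fl, (PySem.Int.ofChars? (l.take fl)).getD 0) :: seedsB l (fl + 1)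
  else []
termination_by l.length - fl
decreasing_by exact pvTermE l.length fl ‹fl < l.length›

def splitString_alt (s : String) : Bool :=
  loopB s.toList (wlW s.toList.length (seedsB s.toList 1) + 1) (seedsB s.toList 1)

-- ===== PRECONDITION & SPEC =====
-- Pre_ excludes exactly the inputs where Python A raises ValueError: any string of length ≥ 2
-- that is not all ASCII digits makes some int() call fail before the search can finish.
def Pre_splitString (s : String) : Prop :=
  s.toList.length ≤ 1 ∨ s.toList.all Char.isDigit = true
instance (s : String) : Decidable (Pre_splitString s) := by unfold Pre_splitString; infer_instance

def pvWitness_splitString : String := "54"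

def Spec_splitString (s : String) (out : Bool) : Prop := out = splitString_alt s
instance (s : String) (out : Bool) : Decidable (Spec_splitString s out) := by unfold Spec_splitString; infer_instance

-- ===== CLAIM (what is proved, stated in full; the proofs are below) =====
def Claim_equal_splitString : Prop := ∀ (s : String), Dom_splitString s → Pre_splitString s → Spec_splitString s (splitString s)

-- ===== LEMMAS AND PROOFS =====

-- arithmetic facts used by the termination proofs of the reference functions below
theorem pvTermA (L s : Nat) : L - s - 0 < L + 1 :=
  Nat.lt_succ_of_le (Nat.le_trans (Nat.sub_le _ _) (Nat.sub_le _ _))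
theorem pvTermB (L s j : Nat) (h : s + 1 + j ≤ L) : L + 1 - (s + 1 + j) < L + 1 - s :=
  Nat.sub_lt_sub_left
    (Nat.lt_succ_of_le (Nat.le_trans (Nat.le_trans (Nat.le_add_right s 1) (Nat.le_add_right (s + 1) j)) h))
    (Nat.lt_of_lt_of_le (Nat.lt_succ_self s) (Nat.le_add_right (s + 1) j))
theorem pvTermC (L s j : Nat) (h : s + 1 + j ≤ L) : L - s - (j + 1) < L - s - j := by
  refine Nat.sub_lt_sub_left ?_ (Nat.lt_succ_self j)
  refine Nat.lt_sub_of_add_lt ?_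
  rw [Nat.add_comm j s]
  exact Nat.lt_of_succ_le (by rw [Nat.add_right_comm] at h; exact h)

-- fuel-free reference version of A's dfs (used only in the proofs)
mutual
def dfsR (l : List Char) (start : Nat) (prev : Int) : Bool :=
  if start = l.length then true
  else loopR l start prev 0
termination_by (l.length + 1 - start, l.length + 1)
decreasing_by exact Prod.Lex.right' _ (Nat.le_refl _) (pvTermA l.length start)
def loopR (l : List Char) (start : Nat) (prev : Int) (j : Nat) : Bool :=
  if start + 1 + j ≤ l.length then
    if parseA ((l.drop start).take (1 + j)) < prev - 1 then false
    else if parseA ((l.drop start).take (1 + j)) = prev - 1 then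
      dfsR l (start + 1 + j) (parseA ((l.drop start).take (1 + j))) || loopR l start prev (j + 1)
    else loopR l start prev (j + 1)
  else false
termination_by (l.length + 1 - start, l.length - start - j)
decreasing_by
  · exact Prod.Lex.left _ _ (pvTermB l.length start j ‹start + 1 + j ≤ l.length›)
  · exact Prod.Lex.right' _ (Nat.le_refl _) (pvTermC l.length start j ‹start + 1 + j ≤ l.length›)
  · exact Prod.Lex.right' _ (Nat.le_refl _) (pvTermC l.length start j ‹start + 1 + j ≤ l.length›)
end

-- call-depth measures for the fueled functions
def muD (L start : Nat) : Nat := (L + 1 - start) * (L + 3) + 1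
def muL (L start j : Nat) : Nat := muD L start - 1 - j

theorem muKey (L start j : Nat) (h : start + 1 + j ≤ L) :
    muD L (start + 1 + j) < muL L start j := by
  have e0 : muD L (start + 1 + j) = (L + 1 - (start + 1 + j)) * (L + 3) + 1 := rfl
  have e1 : muL L start j = (L + 1 - start) * (L + 3) + 1 - 1 - j := rfl
  rw [e0, e1]
  have hc : 1 + j ≤ L + 1 - start := by omega
  have h1 : (1 + j) * (L + 3) ≤ (L + 1 - start) * (L + 3) := Nat.mul_le_mul_right _ hc
  have h2 : (1 + j) * 3 ≤ (1 + j) * (L + 3) := Nat.mul_le_mul_left _ (by omega)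
  have h3 : (L + 1 - (start + 1 + j)) * (L + 3)
      = (L + 1 - start) * (L + 3) - (1 + j) * (L + 3) := by
    rw [← Nat.sub_mul]; congr 1; omega
  generalize (L + 1 - start) * (L + 3) = X at h1 h3 ⊢
  generalize (1 + j) * (L + 3) = Y at h1 h2 h3 ⊢
  generalize (L + 1 - (start + 1 + j)) * (L + 3) = Z at h3 ⊢
  omega

theorem muTop (L fl : Nat) : muD L fl < pvFuelA L := by
  have e0 : muD L fl = (L + 1 - fl) * (L + 3) + 1 := rfl
  have e1 : pvFuelA L = (L + 2) * (L + 3) := rfl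
  rw [e0, e1]
  have h1 : (L + 1 - fl) * (L + 3) ≤ (L + 1) * (L + 3) :=
    Nat.mul_le_mul_right _ (by omega)
  have h2 : (L + 2) * (L + 3) = (L + 1) * (L + 3) + (L + 3) := Nat.succ_mul (L + 1) (L + 3)
  generalize (L + 1 - fl) * (L + 3) = X at h1 ⊢
  generalize (L + 1) * (L + 3) = Y at h1 h2 ⊢
  rw [h2]
  omega

-- with enough fuel the fueled dfs/loop compute exactly the reference dfs/loop
theorem fuelAdequate : ∀ f : Nat,
    (∀ (l : List Char) (start : Nat) (prev : Int), muD l.length start < f →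
      dfsA l f start prev = dfsR l start prev) ∧
    (∀ (l : List Char) (start : Nat) (prev : Int) (j : Nat), muL l.length start j < f →
      loopA l f start prev j = loopR l start prev j) := by
  intro f
  induction f using Nat.strong_induction_on with
  | _ f ih =>
    match f with
    | 0 => exact ⟨fun l s p h => absurd h (Nat.not_lt_zero _), fun l s p j h => absurd h (Nat.not_lt_zero _)⟩
    | f + 1 =>
      constructor
      · intro l start prev h
        rw [dfsA, dfsR.eq_def]
        split
        · rfl
        · exact (ih f (Nat.lt_succ_self f)).2 l start prev 0
            (by rw [show muL l.length start 0 = muD l.length start - 1 - 0 from rfl]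
                have h1 : 1 ≤ muD l.length start := Nat.succ_le_succ (Nat.zero_le _)
                generalize muD l.length start = X at h h1 ⊢
                omega)
      · intro l start prev j h
        have ej : muL l.length start j = muD l.length start - 1 - j := rfl
        have ej1 : muL l.length start (j + 1) = muD l.length start - 1 - (j + 1) := rfl
        rw [ej] at h
        rw [loopA, loopR.eq_def]
        split
        · rename_i hg
          have hkey := muKey l.length start j hg
          rw [ej] at hkey
          split
          · rfl
          · split
            · rw [(ih f (Nat.lt_succ_self f)).1 l (start + 1 + j) _
                    (Nat.lt_of_lt_of_le hkey (Nat.lt_succ_iff.mp h)),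
                  (ih f (Nat.lt_succ_self f)).2 l start prev (j + 1)
                    (by rw [ej1]
                        have h1 : 1 ≤ muD l.length (start + 1 + j) := Nat.succ_le_succ (Nat.zero_le _)
                        generalize muD l.length (start + 1 + j) = Y at hkey h1
                        generalize muD l.length start = X at h hkey ⊢
                        omega)]
            · exact (ih f (Nat.lt_succ_self f)).2 l start prev (j + 1)
                (by rw [ej1]
                    have h1 : 1 ≤ muD l.length (start + 1 + j) := Nat.succ_le_succ (Nat.zero_le _)
                    generalize muD l.length (start + 1 + j) = Y at hkey h1
                    generalize muD l.length start = X at h hkey ⊢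
                    omega)
        · rfl

-- A's inner loop succeeds iff some successor state B would collect leads dfs to success
theorem loopR_eq_any (l : List Char) (start : Nat) (prev : Int) (j : Nat) :
    loopR l start prev j = (succsB l start prev j).any (fun p => dfsR l p.1 p.2) := by
  induction j using succsB.induct l start prev with
  | case1 j h1 h2 =>
    rw [loopR.eq_def, succsB.eq_def]
    simp only [parseA] at *
    rw [if_pos h1, if_pos h1, if_pos h2, if_pos h2]
    simp
  | case2 j h1 h2 h3 ih =>
    rw [loopR.eq_def, succsB.eq_def]
    simp only [parseA] at *
    rw [if_pos h1, if_pos h1, if_neg h2, if_neg h2, if_pos h3, if_pos h3]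
    simp [ih]
  | case3 j h1 h2 h3 ih =>
    rw [loopR.eq_def, succsB.eq_def]
    simp only [parseA] at *
    rw [if_pos h1, if_pos h1, if_neg h2, if_neg h2, if_neg h3, if_neg h3]
    exact ih
  | case4 j h1 =>
    rw [loopR.eq_def, succsB.eq_def]
    simp only [parseA] at *
    rw [if_neg h1, if_neg h1]
    simp

theorem dfsR_eq_any (l : List Char) (start : Nat) (prev : Int) (h : start ≠ l.length) :
    dfsR l start prev = (succsB l start prev 0).any (fun p => dfsR l p.1 p.2) := by
  rw [dfsR.eq_def, if_neg h, loopR_eq_any]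

-- the termination bound for the worklist: successors of a state weigh strictly less than the state
theorem wlW_succsB (l : List Char) (start : Nat) (prev : Int) (j : Nat) :
    wlW l.length (succsB l start prev j) + 1 ≤ 2 ^ (l.length - start - j) := by
  induction j using succsB.induct l start prev with
  | case1 j h1 h2 =>
    rw [succsB.eq_def, if_pos h1, if_pos h2]
    exact Nat.one_le_two_pow
  | case2 j h1 h2 h3 ih =>
    rw [succsB.eq_def, if_pos h1, if_neg h2, if_pos h3]
    simp only [wlW, List.map_cons, List.sum_cons] at ih ⊢
    have e1 : l.length - (start + 1 + j) = l.length - start - (j + 1) := by omega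
    have e2 : l.length - start - j = (l.length - start - (j + 1)) + 1 := by omega
    rw [e1, e2, Nat.pow_succ, Nat.add_assoc, Nat.mul_two]
    exact Nat.add_le_add_left ih _
  | case3 j h1 h2 h3 ih =>
    rw [succsB.eq_def, if_pos h1, if_neg h2, if_neg h3]
    refine Nat.le_trans ih (Nat.pow_le_pow_right (Nat.le_succ 1) ?_)
    omega
  | case4 j h1 =>
    rw [succsB.eq_def, if_neg h1]
    exact Nat.one_le_two_pow

theorem wlW_step (l : List Char) (st : Nat) (pv : Int) (rest : List (Nat × Int)) :
    wlW l.length (succsB l st pv 0 ++ rest) < wlW l.length ((st, pv) :: rest) := by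
  have h := wlW_succsB l st pv 0
  rw [Nat.sub_zero] at h
  simp only [wlW, List.map_append, List.sum_append, List.map_cons, List.sum_cons] at h ⊢
  exact Nat.add_lt_add_right (Nat.lt_of_succ_le h) _

-- B's worklist loop, with enough fuel, computes "some state on the stack succeeds under dfs"
theorem loopB_eq_any (l : List Char) :
    ∀ (f : Nat) (stack : List (Nat × Int)), wlW l.length stack < f →
      loopB l f stack = stack.any (fun p => dfsR l p.1 p.2) := by
  intro f
  induction f with
  | zero => intro stack h; exact absurd h (Nat.not_lt_zero _)
  | succ f ih =>
    intro stack h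
    match stack with
    | [] => rfl
    | (st, pv) :: rest =>
      rw [loopB]
      split
      · rename_i hst
        rw [List.any_cons, dfsR.eq_def, if_pos hst]
        simp
      · rename_i hst
        have hw : wlW l.length (succsB l st pv 0 ++ rest) < f :=
          Nat.lt_of_lt_of_le (wlW_step l st pv rest) (Nat.lt_succ_iff.mp h)
        rw [ih _ hw, List.any_append, List.any_cons, dfsR_eq_any l st pv hst]

-- A's outer loop is "some seed state succeeds under dfs"
theorem outerA_eq_any (l : List Char) (fl : Nat) :
    outerA l fl = (seedsB l fl).any (fun p => dfsR l p.1 p.2) := by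
  induction fl using seedsB.induct l with
  | case1 fl h ih =>
    rw [outerA, seedsB]
    simp only [parseA] at *
    rw [if_pos h, if_pos h,
        (fuelAdequate (pvFuelA l.length)).1 l fl _ (muTop l.length fl)]
    simp [ih]
  | case2 fl h =>
    rw [outerA, seedsB, if_neg h, if_neg h]
    simp

-- ===== VERDICT (by name: the statement is the Claim_ definition above) =====
theorem splitString_spec : Claim_equal_splitString := by
  intro s _ _
  unfold Spec_splitString splitString splitString_alt
  rw [outerA_eq_any, loopB_eq_any s.toList _ _ (Nat.lt_succ_self _)]
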